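-- pv_equiv track=rewrite | github.com/SENEMISIK/Mathematical-Models-for-Epidemiological-Diseases | recursive_strategy.py | findNewGraph
-- ===== SOURCE A (Python) =====
-- def findNewGraph(graph_dict, nodes1, nodes2):
--   new_graph_dict1 = {}
--   len1 = 0
--   new_graph_dict2 = {}
--   len2 = 0
--   for node in nodes1:
--     new_graph_dict1[node] = []
--   for node in nodes2:
--     new_graph_dict2[node] = []
--   for node in graph_dict:
--     for neighbor in graph_dict[node]:
--       if node in nodes1 and neighbor in nodes1:
--         new_graph_dict1[node].append(neighbor)
--         len1 += 1
--       if node in nodes2 and neighbor in nodes2: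
--         new_graph_dict2[node].append(neighbor)
--         len2 += 1
--   return new_graph_dict1, len1, new_graph_dict2, len2
-- ===== SOURCE B (Python) =====
-- def findNewGraph(graph_dict, nodes1, nodes2):
--   def induced(nodeset):
--     s = set(nodeset)
--     d = {}
--     count = 0
--     for n in nodeset:
--       if n not in d:
--         nbrs = [x for x in graph_dict.get(n, []) if x in s]
--         d[n] = nbrs
--         count += len(nbrs)
--     return d, count
--   d1, c1 = induced(nodes1)
--   d2, c2 = induced(nodes2)
--   return d1, c1, d2, c2
-- ===== Notes on version B (the rewrite author's own statement) =====
-- stated objective: faster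
-- what changed: A makes one combined pass over every edge of the whole graph testing list membership in nodes1/nodes2 per neighbor; B builds each induced subgraph independently in a per-node-set pass, filtering each node's adjacency list through a hash set and counting by length, so the edge loop over the full graph and the repeated list scans disappear.
import Mathlib
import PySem

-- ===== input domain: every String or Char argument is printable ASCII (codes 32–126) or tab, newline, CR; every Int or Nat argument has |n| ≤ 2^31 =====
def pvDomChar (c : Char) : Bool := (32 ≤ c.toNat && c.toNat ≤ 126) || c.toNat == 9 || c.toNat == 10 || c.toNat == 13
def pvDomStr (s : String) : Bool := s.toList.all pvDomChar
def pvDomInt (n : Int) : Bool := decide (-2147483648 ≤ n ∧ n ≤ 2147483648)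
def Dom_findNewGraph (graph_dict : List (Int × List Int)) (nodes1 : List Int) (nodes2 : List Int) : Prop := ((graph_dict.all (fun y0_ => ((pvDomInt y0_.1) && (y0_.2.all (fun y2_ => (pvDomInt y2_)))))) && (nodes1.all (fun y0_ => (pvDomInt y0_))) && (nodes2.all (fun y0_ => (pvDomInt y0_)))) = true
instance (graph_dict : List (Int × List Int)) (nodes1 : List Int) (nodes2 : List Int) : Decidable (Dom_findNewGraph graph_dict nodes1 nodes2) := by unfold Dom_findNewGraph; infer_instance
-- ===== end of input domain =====

-- B builds each induced subgraph in its own per-node-set pass (filter each adjacency list through the node set and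
-- count by length) instead of A's single combined pass over every edge of the whole graph; return values proved equal.

-- ===== PORT A =====
-- literal transliteration of A; dict → PySem.Dict (built from the association list as Python's dict is),
-- new_graph_dict1[node].append(neighbor) → Dict.modify (key always present: node ∈ nodes1 guarantees it)
def findNewGraph (graph_dict : List (Int × List Int)) (nodes1 : List Int) (nodes2 : List Int) : (List (Int × List Int)) × Int × (List (Int × List Int)) × Int :=
  let g := PySem.Dict.ofList graph_dict
  let d1 := nodes1.foldl (fun d n => d.insert n ([] : List Int)) PySem.Dict.empty
  let d2 := nodes2.foldl (fun d n => d.insert n ([] : List Int)) PySem.Dict.empty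
  let r := g.items.foldl (fun st kv =>
      kv.2.foldl (fun st nb =>
        ((if nodes1.contains kv.1 && nodes1.contains nb then
            (st.1.1.modify kv.1 [] (fun l => l ++ [nb]), st.1.2 + 1) else st.1),
         (if nodes2.contains kv.1 && nodes2.contains nb then
            (st.2.1.modify kv.1 [] (fun l => l ++ [nb]), st.2.2 + 1) else st.2))) st)
    ((d1, (0 : Int)), (d2, (0 : Int)))
  (r.1.1.items, r.1.2, r.2.1.items, r.2.2)

-- ===== PORT B =====
-- helper 'induced' of Source B: one pass over nodeset, skipping keys already present, filtering each adjacency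
-- list through the membership set and counting by length
def pvInduced (g : PySem.Dict Int (List Int)) (nodeset : List Int) : PySem.Dict Int (List Int) × Int :=
  let s : PySem.Set Int := PySem.Set.ofList nodeset
  nodeset.foldl (fun st n =>
    if st.1.contains n then st
    else
      let nbrs := (g.getD n []).filter (fun x => PySem.Set.contains s x)
      (st.1.insert n nbrs, st.2 + (nbrs.length : Int)))
    (PySem.Dict.empty, (0 : Int))

def findNewGraph_alt (graph_dict : List (Int × List Int)) (nodes1 : List Int) (nodes2 : List Int) : (List (Int × List Int)) × Int × (List (Int × List Int)) × Int :=
  let g := PySem.Dict.ofList graph_dict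
  let r1 := pvInduced g nodes1
  let r2 := pvInduced g nodes2
  (r1.1.items, r1.2, r2.1.items, r2.2)

-- ===== PRECONDITION & SPEC =====
def Spec_findNewGraph (graph_dict : List (Int × List Int)) (nodes1 : List Int) (nodes2 : List Int) (out : (List (Int × List Int)) × Int × (List (Int × List Int)) × Int) : Prop := out = findNewGraph_alt graph_dict nodes1 nodes2
instance (graph_dict : List (Int × List Int)) (nodes1 : List Int) (nodes2 : List Int) (out : (List (Int × List Int)) × Int × (List (Int × List Int)) × Int) : Decidable (Spec_findNewGraph graph_dict nodes1 nodes2 out) := by unfold Spec_findNewGraph; infer_instance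

-- ===== CLAIM (what is proved, stated in full; the proofs are below) =====
def Claim_equal_findNewGraph : Prop := ∀ (graph_dict : List (Int × List Int)) (nodes1 : List Int) (nodes2 : List Int), Dom_findNewGraph graph_dict nodes1 nodes2 → Spec_findNewGraph graph_dict nodes1 nodes2 (findNewGraph graph_dict nodes1 nodes2)

-- ===== LEMMAS AND PROOFS =====

-- the per-node filtered adjacency list both sides compute
def pvW (g : PySem.Dict Int (List Int)) (ns : List Int) (n : Int) : List Int :=
  (g.getD n []).filter (fun x => ns.contains x)

-- the new keys a first-occurrence pass over ns adds on top of already-present keys ks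
def pvNewK : List Int → List Int → List Int
  | [], _ => []
  | n :: t, ks => if ks.contains n then pvNewK t ks else n :: pvNewK t (ks ++ [n])

-- edge list of an adjacency structure
def pvPairs (L : List (Int × List Int)) : List (Int × Int) :=
  L.flatMap (fun kv => kv.2.map (fun nb => (kv.1, nb)))

theorem pv_set_contains (ns : List Int) (x : Int) :
    PySem.Set.contains (PySem.Set.ofList ns) x = ns.contains x := by
  by_cases h : x ∈ ns <;> simp [h, PySem.Set.mem_ofList]

theorem pv_dict_contains_keys (d : PySem.Dict Int (List Int)) (n : Int) :
    d.contains n = d.keys.contains n := by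
  by_cases h : n ∈ d.keys
  · simp [h, (PySem.Dict.contains_iff_mem_keys d n).2 h]
  · have hc : d.contains n = false := by
      cases hcc : d.contains n
      · rfl
      · exact absurd ((PySem.Dict.contains_iff_mem_keys _ _).1 hcc) h
    simp [h, hc]

theorem pv_newK_update : ∀ (ns ks : List Int), PySem.Set.update ks ns = ks ++ pvNewK ns ks := by
  intro ns
  induction ns with
  | nil => intro ks; simp [PySem.Set.update, pvNewK]
  | cons n t ih =>
    intro ks
    rw [PySem.Set.update_cons, PySem.Set.add_eq_ite]
    by_cases h : n ∈ ks
    · have hc : ks.contains n = true := by simp [h]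
      simp [h, pvNewK, ih ks]
    · have hc : ks.contains n = false := by simp [h]
      simp [h, pvNewK, ih (ks ++ [n])]

theorem pv_newK_ofList (ns : List Int) : pvNewK ns [] = PySem.Set.ofList ns := by
  have h := pv_newK_update ns []
  rw [PySem.Set.update_nil_left] at h
  simpa using h.symm

theorem pv_B_gen (w : Int → List Int) : ∀ (ns : List Int) (d : PySem.Dict Int (List Int)) (c : Int),
    List.foldl (fun st n =>
      if (st : PySem.Dict Int (List Int) × Int).1.contains n then st
      else (st.1.insert n (w n), st.2 + ((w n).length : Int))) (d, c) ns
    = (PySem.Dict.mk (d.items ++ (pvNewK ns d.keys).map (fun n => (n, w n))),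
       c + ((pvNewK ns d.keys).map (fun n => ((w n).length : Int))).sum) := by
  intro ns
  induction ns with
  | nil => intro d c; simp [pvNewK]
  | cons n t ih =>
    intro d c
    rw [List.foldl_cons]
    by_cases h : d.contains n = true
    · have hk : d.keys.contains n = true := (pv_dict_contains_keys d n) ▸ h
      simp only [h, pvNewK, hk, if_true]
      exact ih d c
    · have hcf : d.contains n = false := by cases hcc : d.contains n; rfl; exact absurd hcc h
      have hk : d.keys.contains n = false := (pv_dict_contains_keys d n) ▸ hcf
      have hins : (d.insert n (w n)).items = d.items ++ [(n, w n)] :=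
        PySem.Dict.items_insert_of_not_contains _ _ hcf
      have hkeys : (d.insert n (w n)).keys = d.keys ++ [n] := by
        simp [PySem.Dict.keys, hins]
      simp only [hcf, pvNewK, hk, Bool.false_eq_true, if_false]
      rw [ih (d.insert n (w n)) (c + ((w n).length : Int)), hins, hkeys]
      simp [List.map_cons, List.sum_cons]
      ring

theorem pv_B_char (g : PySem.Dict Int (List Int)) (ns : List Int) :
    pvInduced g ns
    = (PySem.Dict.mk ((PySem.Set.ofList ns).map (fun n => (n, pvW g ns n))),
       ((PySem.Set.ofList ns).map (fun n => ((pvW g ns n).length : Int))).sum) := by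
  have h := pv_B_gen (pvW g ns) ns PySem.Dict.empty 0
  simp only [pvInduced, pv_set_contains]
  simp only [PySem.Dict.keys_empty] at h
  rw [pv_newK_ofList] at h
  simpa [pvW] using h

theorem pv_foldl_filter {α β : Type} (q : β → Bool) (f : α → β → α) :
    ∀ (l : List β) (a : α),
      l.foldl (fun a x => if q x then f a x else a) a = (l.filter q).foldl f a := by
  intro l
  induction l with
  | nil => intro a; rfl
  | cons x t ih =>
    intro a
    by_cases h : q x = true <;> simp [h, ih]

theorem pv_d0_getD (ns : List Int) (k : Int) :
    (List.foldl (fun d n => d.insert n ([] : List Int)) PySem.Dict.empty ns).getD k [] = [] := by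
  have gen : ∀ (l : List Int) (d : PySem.Dict Int (List Int)),
      (∀ j, d.getD j [] = []) → ∀ j, (List.foldl (fun d n => d.insert n ([] : List Int)) d l).getD j [] = [] := by
    intro l
    induction l with
    | nil => intro d hd j; exact hd j
    | cons x t ih =>
      intro d hd j
      refine ih _ (fun j' => ?_) j
      rw [PySem.Dict.getD_insert]
      split_ifs <;> simp [hd]
  exact gen ns PySem.Dict.empty (fun j => by simp [PySem.Dict.getD_empty]) k

theorem pv_pairs_key (n : Int) : ∀ (L : List (Int × List Int)), (L.map Prod.fst).Nodup →
    (pvPairs L).filter (fun p => p.1 == n) = ((PySem.Dict.mk L).getD n []).map (fun x => (n, x)) := by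
  intro L
  induction L with
  | nil => intro _; simp [pvPairs, PySem.Dict.getD_eq_get?_getD]; rfl
  | cons kv t ih =>
    intro hnd
    have hnd' : (t.map Prod.fst).Nodup := (List.nodup_cons.mp hnd).2
    have hknot : kv.1 ∉ t.map Prod.fst := (List.nodup_cons.mp hnd).1
    have hflat : pvPairs (kv :: t) = kv.2.map (fun nb => (kv.1, nb)) ++ pvPairs t := by
      simp [pvPairs]
    rw [hflat, List.filter_append]
    have hgetD : (PySem.Dict.mk (kv :: t)).getD n [] =
        if kv.1 == n then kv.2 else (PySem.Dict.mk t).getD n [] := by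
      rw [PySem.Dict.getD_eq_get?_getD, PySem.Dict.get?_mk_cons]
      split_ifs with h <;> simp [PySem.Dict.getD_eq_get?_getD]
    by_cases h : kv.1 = n
    · have htnil : (pvPairs t).filter (fun p => p.1 == n) = [] := by
        apply List.filter_eq_nil_iff.mpr
        intro p hp hpn
        apply hknot
        have hmem : p.1 ∈ t.map Prod.fst := by
          rcases List.mem_flatMap.mp hp with ⟨kv', hkv', hmem⟩
          rcases List.mem_map.mp hmem with ⟨nb, _, rfl⟩
          exact List.mem_map.mpr ⟨kv', hkv', rfl⟩
        rwa [show p.1 = kv.1 by simp at hpn; omega] at hmem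
      rw [htnil, hgetD]
      simp [h, List.filter_map, Function.comp_def]
    · have hnil : (kv.2.map (fun nb => (kv.1, nb))).filter (fun p => p.1 == n) = [] := by
        apply List.filter_eq_nil_iff.mpr
        intro p hp
        rcases List.mem_map.mp hp with ⟨nb, _, rfl⟩
        simp [h]
      rw [hnil, hgetD]
      simp [h, ih hnd']

theorem pv_partition_length : ∀ (ks : List Int) (l : List (Int × Int)), ks.Nodup →
    (∀ p ∈ l, p.1 ∈ ks) →
    (l.length : Int) = (ks.map (fun n => (((l.filter (fun p => p.1 == n)).length : Int)))).sum := by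
  intro ks
  induction ks with
  | nil =>
    intro l _ hl
    have : l = [] := by
      cases l with
      | nil => rfl
      | cons p t => exact absurd (hl p (by simp)) (by simp)
    simp [this]
  | cons k t ih =>
    intro l hnd hl
    have hnd' : t.Nodup := (List.nodup_cons.mp hnd).2
    have hknot : k ∉ t := (List.nodup_cons.mp hnd).1
    have hsplit : l.length = (l.filter (fun p => p.1 == k)).length
        + (l.filter (fun p => !(p.1 == k))).length := by
      simpa using l.length_eq_length_filter_add (fun p => p.1 == k)
    have hl' : ∀ p ∈ l.filter (fun p => !(p.1 == k)), p.1 ∈ t := by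
      intro p hp
      have hm := List.mem_filter.mp hp
      have hmem := hl p hm.1
      simp at hmem hm
      rcases hmem with h | h
      · exact absurd h hm.2
      · exact h
    have hrec := ih (l.filter (fun p => !(p.1 == k))) hnd' hl'
    have hmapeq : ∀ n ∈ t,
        ((l.filter (fun p => !(p.1 == k))).filter (fun p => p.1 == n)).length
        = (l.filter (fun p => p.1 == n)).length := by
      intro n hn
      congr 1
      rw [List.filter_comm]
      apply List.filter_eq_self.mpr
      intro p hp
      have hpn : p.1 = n := by simpa using (List.mem_filter.mp hp).2
      have hne : p.1 ≠ k := fun hc => hknot (hc ▸ hpn ▸ hn)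
      simp [hne]
    rw [List.map_cons, List.sum_cons]
    push_cast [hsplit]
    rw [hrec]
    congr 1
    apply congrArg
    apply List.map_congr_left
    intro n hn
    rw [hmapeq n hn]

theorem pv_flatten {σ : Type} (step : σ → (Int × Int) → σ) :
    ∀ (L : List (Int × List Int)) (s : σ),
      L.foldl (fun s kv => kv.2.foldl (fun s nb => step s (kv.1, nb)) s) s
      = (pvPairs L).foldl step s := by
  intro L
  induction L with
  | nil => intro s; rfl
  | cons kv t ih =>
    intro s
    rw [List.foldl_cons, ih]
    show (pvPairs t).foldl step (kv.2.foldl (fun s nb => step s (kv.1, nb)) s) = _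
    rw [show pvPairs (kv :: t) = kv.2.map (fun nb => (kv.1, nb)) ++ pvPairs t by simp [pvPairs]]
    rw [List.foldl_append, List.foldl_map]

-- the single-side A computation equals B's induced-subgraph helper
theorem pv_side (g : PySem.Dict Int (List Int)) (hg : g.keys.Nodup) (ns : List Int) :
    (g.items.foldl (fun dc kv =>
        kv.2.foldl (fun dc nb =>
          if ns.contains kv.1 && ns.contains nb then
            ((dc : PySem.Dict Int (List Int) × Int).1.modify kv.1 [] (fun l => l ++ [nb]), dc.2 + 1)
          else dc) dc)
      (ns.foldl (fun d n => d.insert n ([] : List Int)) PySem.Dict.empty, (0 : Int)))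
    = pvInduced g ns := by
  set d0 := ns.foldl (fun d n => d.insert n ([] : List Int)) PySem.Dict.empty with hd0
  set K : List Int := PySem.Set.ofList ns with hK
  -- flatten the nested edge loop into one fold over the pair list
  rw [pv_flatten (fun dc p =>
        if ns.contains p.1 && ns.contains p.2 then
          (dc.1.modify p.1 [] (fun l => l ++ [p.2]), dc.2 + 1)
        else dc) g.items (d0, 0)]
  -- drop the skipped pairs
  refine Eq.trans (pv_foldl_filter (fun p => ns.contains p.1 && ns.contains p.2)
        (fun dc p => ((dc.1.modify p.1 [] (fun l => l ++ [p.2]), dc.2 + 1) :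
          PySem.Dict Int (List Int) × Int)) (pvPairs g.items) (d0, 0)) ?_
  set Pf := (pvPairs g.items).filter (fun p => ns.contains p.1 && ns.contains p.2) with hPf
  -- split the two independent accumulators
  refine Eq.trans (PySem.List.foldl_prod_mk (f := fun d p => d.modify p.1 [] (fun l => l ++ [p.2]))
        (g := fun c _ => c + 1) Pf d0 0) ?_
  -- facts about ns / K
  have hmemK : ∀ x, x ∈ K ↔ x ∈ ns := fun x => PySem.Set.mem_ofList ns x
  have hndK : K.Nodup := PySem.Set.nodup_ofList ns
  have hd0keys : d0.keys = K := by
    rw [hd0, PySem.Dict.keys_foldl_insert, PySem.Dict.keys_empty, PySem.Set.update_nil_left]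
  have hPfmem : ∀ p ∈ Pf, p.1 ∈ K := by
    intro p hp
    have hc := (List.mem_filter.mp hp).2
    exact (hmemK p.1).mpr (by simpa using (Bool.and_eq_true _ _ |>.mp hc).1)
  -- the final dict of the A loop
  set D := Pf.foldl (fun d p => d.modify p.1 [] (fun l => l ++ [p.2])) d0 with hD
  have hDkeys : D.keys = K := by
    rw [hD, PySem.Dict.keys_foldl_modify_key Pf Prod.fst [] (fun _ p => fun l => l ++ [p.2]) d0,
        hd0keys, PySem.Set.update_eq_append_filter]
    have hnil : (PySem.Set.ofList (Pf.map Prod.fst)).filter (fun y => !PySem.Set.contains K y) = [] := by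
      apply List.filter_eq_nil_iff.mpr
      intro y hy
      have hy' : y ∈ Pf.map Prod.fst := (PySem.Set.mem_ofList _ _).mp hy
      rcases List.mem_map.mp hy' with ⟨p, hp, rfl⟩
      have hpk := hPfmem p hp
      simp [hpk]
    rw [hnil, List.append_nil]
  have hDnodup : D.keys.Nodup := hDkeys ▸ hndK
  -- value of the A loop at each key n ∈ ns
  have hval : ∀ n ∈ ns, Pf.filter (fun p => p.1 == n) = (pvW g ns n).map (fun x => (n, x)) := by
    intro n hn
    have hcn : ns.contains n = true := by simp [hn]
    rw [hPf, List.filter_comm, pv_pairs_key n g.items hg]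
    show List.filter _ ((g.getD n []).map fun x => (n, x)) = _
    simp [List.filter_map, Function.comp_def, hn, pvW]
  have hgetDD : ∀ n ∈ ns, D.getD n [] = pvW g ns n := by
    intro n hn
    rw [hD, PySem.Dict.getD_foldl_modify_append, hd0, pv_d0_getD, hval n hn]
    simp
  rw [pv_B_char g ns]
  refine Prod.ext ?_ ?_
  · -- the dicts agree
    apply PySem.Dict.ext
    show D.items = K.map fun n => (n, pvW g ns n)
    rw [PySem.Dict.items_eq_map_keys D hDnodup [], hDkeys]
    apply List.map_congr_left
    intro n hn
    rw [hgetDD n ((hmemK n).mp hn)]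
  · -- the edge counts agree
    show Pf.foldl (fun c _ => c + 1) 0 = (K.map fun n => ((pvW g ns n).length : Int)).sum
    rw [PySem.List.foldl_add Pf (fun _ => (1 : Int)) 0]
    have hlen : (0 : Int) + ((Pf.map fun _ => (1 : Int)).sum) = (Pf.length : Int) := by
      simp [List.map_const']
    rw [hlen, pv_partition_length K Pf hndK hPfmem]
    apply congrArg
    apply List.map_congr_left
    intro n hn
    rw [hval n ((hmemK n).mp hn)]
    simp

-- ===== VERDICT (by name: the statement is the Claim_ definition above) =====
theorem findNewGraph_spec : Claim_equal_findNewGraph := by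
  intro gd ns1 ns2 _
  show findNewGraph gd ns1 ns2 = findNewGraph_alt gd ns1 ns2
  have hnd : (PySem.Dict.ofList gd).keys.Nodup := PySem.Dict.nodup_keys_ofList gd
  have hstep : (fun (st : (PySem.Dict Int (List Int) × Int) × (PySem.Dict Int (List Int) × Int)) (kv : Int × List Int) =>
      kv.2.foldl (fun st nb =>
        ((if ns1.contains kv.1 && ns1.contains nb then
            (st.1.1.modify kv.1 [] (fun l => l ++ [nb]), st.1.2 + 1) else st.1),
         (if ns2.contains kv.1 && ns2.contains nb then
            (st.2.1.modify kv.1 [] (fun l => l ++ [nb]), st.2.2 + 1) else st.2))) st)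
    = (fun st kv =>
        (kv.2.foldl (fun dc nb => if ns1.contains kv.1 && ns1.contains nb then
            ((dc : PySem.Dict Int (List Int) × Int).1.modify kv.1 [] (fun l => l ++ [nb]), dc.2 + 1) else dc) st.1,
         kv.2.foldl (fun dc nb => if ns2.contains kv.1 && ns2.contains nb then
            ((dc : PySem.Dict Int (List Int) × Int).1.modify kv.1 [] (fun l => l ++ [nb]), dc.2 + 1) else dc) st.2)) := by
    funext st kv
    exact PySem.List.foldl_prod_mk
      (f := fun dc nb => if ns1.contains kv.1 && ns1.contains nb then
        ((dc : PySem.Dict Int (List Int) × Int).1.modify kv.1 [] (fun l => l ++ [nb]), dc.2 + 1) else dc)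
      (g := fun dc nb => if ns2.contains kv.1 && ns2.contains nb then
        ((dc : PySem.Dict Int (List Int) × Int).1.modify kv.1 [] (fun l => l ++ [nb]), dc.2 + 1) else dc)
      kv.2 st.1 st.2
  have hr : (PySem.Dict.ofList gd).items.foldl (fun st kv =>
      kv.2.foldl (fun st nb =>
        ((if ns1.contains kv.1 && ns1.contains nb then
            (st.1.1.modify kv.1 [] (fun l => l ++ [nb]), st.1.2 + 1) else st.1),
         (if ns2.contains kv.1 && ns2.contains nb then
            (st.2.1.modify kv.1 [] (fun l => l ++ [nb]), st.2.2 + 1) else st.2))) st)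
      ((ns1.foldl (fun d n => d.insert n ([] : List Int)) PySem.Dict.empty, (0 : Int)),
       (ns2.foldl (fun d n => d.insert n ([] : List Int)) PySem.Dict.empty, (0 : Int)))
    = (pvInduced (PySem.Dict.ofList gd) ns1, pvInduced (PySem.Dict.ofList gd) ns2) := by
    rw [hstep]
    refine Eq.trans (PySem.List.foldl_prod_mk
      (f := fun dc kv => kv.2.foldl (fun dc nb => if ns1.contains kv.1 && ns1.contains nb then
        ((dc : PySem.Dict Int (List Int) × Int).1.modify kv.1 [] (fun l => l ++ [nb]), dc.2 + 1) else dc) dc)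
      (g := fun dc kv => kv.2.foldl (fun dc nb => if ns2.contains kv.1 && ns2.contains nb then
        ((dc : PySem.Dict Int (List Int) × Int).1.modify kv.1 [] (fun l => l ++ [nb]), dc.2 + 1) else dc) dc)
      (PySem.Dict.ofList gd).items _ _) ?_
    rw [pv_side _ hnd ns1, pv_side _ hnd ns2]
  calc findNewGraph gd ns1 ns2
      = (((PySem.Dict.ofList gd).items.foldl (fun st kv =>
            kv.2.foldl (fun st nb =>
              ((if ns1.contains kv.1 && ns1.contains nb then
                  (st.1.1.modify kv.1 [] (fun l => l ++ [nb]), st.1.2 + 1) else st.1),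
               (if ns2.contains kv.1 && ns2.contains nb then
                  (st.2.1.modify kv.1 [] (fun l => l ++ [nb]), st.2.2 + 1) else st.2))) st)
            ((ns1.foldl (fun d n => d.insert n ([] : List Int)) PySem.Dict.empty, (0 : Int)),
             (ns2.foldl (fun d n => d.insert n ([] : List Int)) PySem.Dict.empty, (0 : Int)))).1.1.items,
           ((PySem.Dict.ofList gd).items.foldl (fun st kv =>
            kv.2.foldl (fun st nb =>
              ((if ns1.contains kv.1 && ns1.contains nb then
                  (st.1.1.modify kv.1 [] (fun l => l ++ [nb]), st.1.2 + 1) else st.1),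
               (if ns2.contains kv.1 && ns2.contains nb then
                  (st.2.1.modify kv.1 [] (fun l => l ++ [nb]), st.2.2 + 1) else st.2))) st)
            ((ns1.foldl (fun d n => d.insert n ([] : List Int)) PySem.Dict.empty, (0 : Int)),
             (ns2.foldl (fun d n => d.insert n ([] : List Int)) PySem.Dict.empty, (0 : Int)))).1.2,
           ((PySem.Dict.ofList gd).items.foldl (fun st kv =>
            kv.2.foldl (fun st nb =>
              ((if ns1.contains kv.1 && ns1.contains nb then
                  (st.1.1.modify kv.1 [] (fun l => l ++ [nb]), st.1.2 + 1) else st.1),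
               (if ns2.contains kv.1 && ns2.contains nb then
                  (st.2.1.modify kv.1 [] (fun l => l ++ [nb]), st.2.2 + 1) else st.2))) st)
            ((ns1.foldl (fun d n => d.insert n ([] : List Int)) PySem.Dict.empty, (0 : Int)),
             (ns2.foldl (fun d n => d.insert n ([] : List Int)) PySem.Dict.empty, (0 : Int)))).2.1.items,
           ((PySem.Dict.ofList gd).items.foldl (fun st kv =>
            kv.2.foldl (fun st nb =>
              ((if ns1.contains kv.1 && ns1.contains nb then
                  (st.1.1.modify kv.1 [] (fun l => l ++ [nb]), st.1.2 + 1) else st.1),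
               (if ns2.contains kv.1 && ns2.contains nb then
                  (st.2.1.modify kv.1 [] (fun l => l ++ [nb]), st.2.2 + 1) else st.2))) st)
            ((ns1.foldl (fun d n => d.insert n ([] : List Int)) PySem.Dict.empty, (0 : Int)),
             (ns2.foldl (fun d n => d.insert n ([] : List Int)) PySem.Dict.empty, (0 : Int)))).2.2) := rfl
    _ = ((pvInduced (PySem.Dict.ofList gd) ns1).1.items, (pvInduced (PySem.Dict.ofList gd) ns1).2,
         (pvInduced (PySem.Dict.ofList gd) ns2).1.items, (pvInduced (PySem.Dict.ofList gd) ns2).2) := by rw [hr]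
    _ = findNewGraph_alt gd ns1 ns2 := rfl
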